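-- pv_equiv track=rewrite | github.com/Atom-Cunningham/pyscraper | analyzer/analyzer.py | categorize_usage
-- ===== SOURCE A (Python) =====
-- def categorize_usage(rs_paths):
--     categories = {"kernel": 0, "driver": 0, "sandbox": 0, "library": 0, "other": 0}
--     for path in rs_paths:
--         if "kernel" in path:
--             categories["kernel"] += 1
--         elif "driver" in path:
--             categories["driver"] += 1
--         elif "sandbox" in path:
--             categories["sandbox"] += 1
--         elif "lib" in path:
--             categories["library"] += 1
--         else:
--             categories["other"] += 1
--     return categories
-- ===== SOURCE B (Python) =====
-- def categorize_usage(rs_paths):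
--     k = sum(1 for p in rs_paths if "kernel" in p)
--     d = sum(1 for p in rs_paths if "driver" in p and "kernel" not in p)
--     s = sum(1 for p in rs_paths if "sandbox" in p and "driver" not in p and "kernel" not in p)
--     l = sum(1 for p in rs_paths
--             if "lib" in p and "sandbox" not in p and "driver" not in p and "kernel" not in p)
--     return {"kernel": k, "driver": d, "sandbox": s, "library": l,
--             "other": len(rs_paths) - k - d - s - l}
-- ===== Notes on version B (the rewrite author's own statement) =====
-- stated objective: alternative
-- what changed: B replaces A's single per-path if/elif pass mutating a counter dict with four independent filtered-count passes (one per keyword, each masking out higher-priority keywords) and derives 'other' arithmetically as the complement of the total length, building the dict once at the end.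
import Mathlib
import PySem

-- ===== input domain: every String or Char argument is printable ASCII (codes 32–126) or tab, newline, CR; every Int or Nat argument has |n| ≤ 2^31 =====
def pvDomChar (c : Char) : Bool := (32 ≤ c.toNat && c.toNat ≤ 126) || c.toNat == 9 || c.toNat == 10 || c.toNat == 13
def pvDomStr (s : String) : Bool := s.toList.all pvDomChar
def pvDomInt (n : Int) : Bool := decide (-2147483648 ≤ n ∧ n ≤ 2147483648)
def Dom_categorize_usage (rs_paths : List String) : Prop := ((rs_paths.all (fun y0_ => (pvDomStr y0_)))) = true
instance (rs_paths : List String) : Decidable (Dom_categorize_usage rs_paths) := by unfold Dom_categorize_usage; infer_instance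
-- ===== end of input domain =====

-- B replaces the single per-path if/elif pass with four filtered-count passes plus an arithmetic complement for 'other' (alternative decomposition; same cost).

-- ===== PORT A =====
-- A's loop body: the if/elif chain updating the categories dict ('categories[k] += 1').
def pvStepA (d : PySem.Dict String Int) (path : String) : PySem.Dict String Int :=
  if PySem.Str.isIn "kernel" path then d.insert "kernel" (d.getD "kernel" 0 + 1)
  else if PySem.Str.isIn "driver" path then d.insert "driver" (d.getD "driver" 0 + 1)
  else if PySem.Str.isIn "sandbox" path then d.insert "sandbox" (d.getD "sandbox" 0 + 1)
  else if PySem.Str.isIn "lib" path then d.insert "library" (d.getD "library" 0 + 1)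
  else d.insert "other" (d.getD "other" 0 + 1)

def categorize_usage (rs_paths : List String) : List (String × Int) :=
  (rs_paths.foldl pvStepA
    (PySem.Dict.ofList [("kernel", 0), ("driver", 0), ("sandbox", 0), ("library", 0), ("other", 0)])).items

-- ===== PORT B =====
-- Source B's four generator-sum filters (sum(1 for p in rs_paths if …) = countP).
def pvPK (p : String) : Bool := PySem.Str.isIn "kernel" p
def pvPD (p : String) : Bool := PySem.Str.isIn "driver" p && !PySem.Str.isIn "kernel" p
def pvPS (p : String) : Bool :=
  PySem.Str.isIn "sandbox" p && !PySem.Str.isIn "driver" p && !PySem.Str.isIn "kernel" p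
def pvPL (p : String) : Bool :=
  PySem.Str.isIn "lib" p && !PySem.Str.isIn "sandbox" p && !PySem.Str.isIn "driver" p && !PySem.Str.isIn "kernel" p

def categorize_usage_alt (rs_paths : List String) : List (String × Int) :=
  let k : Int := rs_paths.countP pvPK
  let d : Int := rs_paths.countP pvPD
  let s : Int := rs_paths.countP pvPS
  let l : Int := rs_paths.countP pvPL
  [("kernel", k), ("driver", d), ("sandbox", s), ("library", l),
   ("other", (rs_paths.length : Int) - k - d - s - l)]

-- ===== PRECONDITION & SPEC =====
def Spec_categorize_usage (rs_paths : List String) (out : List (String × Int)) : Prop := out = categorize_usage_alt rs_paths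
instance (rs_paths : List String) (out : List (String × Int)) : Decidable (Spec_categorize_usage rs_paths out) := by unfold Spec_categorize_usage; infer_instance

-- ===== CLAIM (what is proved, stated in full; the proofs are below) =====
def Claim_equal_categorize_usage : Prop := ∀ (rs_paths : List String), Dom_categorize_usage rs_paths → Spec_categorize_usage rs_paths (categorize_usage rs_paths)

-- ===== LEMMAS AND PROOFS =====

-- A's fold over the dict, characterised by B's four filter counts plus the count of unmatched paths.
lemma pv_fold_items (rs : List String) : ∀ (a b c d e : Int),
    (rs.foldl pvStepA (PySem.Dict.mk [("kernel", a), ("driver", b), ("sandbox", c), ("library", d), ("other", e)])).items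
    = [("kernel", a + (rs.countP pvPK : Int)),
       ("driver", b + (rs.countP pvPD : Int)),
       ("sandbox", c + (rs.countP pvPS : Int)),
       ("library", d + (rs.countP pvPL : Int)),
       ("other", e + (rs.countP (fun p => !pvPK p && !pvPD p && !pvPS p && !pvPL p) : Int))] := by
  induction rs with
  | nil => intro a b c d e; simp [PySem.Dict.items]
  | cons h t ih =>
    intro a b c d e
    simp only [List.foldl_cons, pvStepA]
    by_cases h1 : PySem.Str.isIn "kernel" h = true
    · rw [if_pos h1, show (PySem.Dict.mk [("kernel", a), ("driver", b), ("sandbox", c), ("library", d), ("other", e)]).insert "kernel" ((PySem.Dict.mk [("kernel", a), ("driver", b), ("sandbox", c), ("library", d), ("other", e)]).getD "kernel" 0 + 1) = PySem.Dict.mk [("kernel", a + 1), ("driver", b), ("sandbox", c), ("library", d), ("other", e)] from by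
        simp [PySem.Dict.insert, PySem.Dict.getD, PySem.Dict.get?, PySem.Dict.items], ih]
      simp at h1
      simp [List.countP_cons, pvPK, pvPD, pvPS, pvPL, h1]
      omega
    · by_cases h2 : PySem.Str.isIn "driver" h = true
      · rw [if_neg h1, if_pos h2, show (PySem.Dict.mk [("kernel", a), ("driver", b), ("sandbox", c), ("library", d), ("other", e)]).insert "driver" ((PySem.Dict.mk [("kernel", a), ("driver", b), ("sandbox", c), ("library", d), ("other", e)]).getD "driver" 0 + 1) = PySem.Dict.mk [("kernel", a), ("driver", b + 1), ("sandbox", c), ("library", d), ("other", e)] from by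
          simp [PySem.Dict.insert, PySem.Dict.getD, PySem.Dict.get?, PySem.Dict.items], ih]
        simp at h1 h2
        simp [List.countP_cons, pvPK, pvPD, pvPS, pvPL, h1, h2]
        omega
      · by_cases h3 : PySem.Str.isIn "sandbox" h = true
        · rw [if_neg h1, if_neg h2, if_pos h3, show (PySem.Dict.mk [("kernel", a), ("driver", b), ("sandbox", c), ("library", d), ("other", e)]).insert "sandbox" ((PySem.Dict.mk [("kernel", a), ("driver", b), ("sandbox", c), ("library", d), ("other", e)]).getD "sandbox" 0 + 1) = PySem.Dict.mk [("kernel", a), ("driver", b), ("sandbox", c + 1), ("library", d), ("other", e)] from by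
            simp [PySem.Dict.insert, PySem.Dict.getD, PySem.Dict.get?, PySem.Dict.items], ih]
          simp at h1 h2 h3
          simp [List.countP_cons, pvPK, pvPD, pvPS, pvPL, h1, h2, h3]
          omega
        · by_cases h4 : PySem.Str.isIn "lib" h = true
          · rw [if_neg h1, if_neg h2, if_neg h3, if_pos h4, show (PySem.Dict.mk [("kernel", a), ("driver", b), ("sandbox", c), ("library", d), ("other", e)]).insert "library" ((PySem.Dict.mk [("kernel", a), ("driver", b), ("sandbox", c), ("library", d), ("other", e)]).getD "library" 0 + 1) = PySem.Dict.mk [("kernel", a), ("driver", b), ("sandbox", c), ("library", d + 1), ("other", e)] from by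
              simp [PySem.Dict.insert, PySem.Dict.getD, PySem.Dict.get?, PySem.Dict.items], ih]
            simp at h1 h2 h3 h4
            simp [List.countP_cons, pvPK, pvPD, pvPS, pvPL, h1, h2, h3, h4]
            omega
          · rw [if_neg h1, if_neg h2, if_neg h3, if_neg h4, show (PySem.Dict.mk [("kernel", a), ("driver", b), ("sandbox", c), ("library", d), ("other", e)]).insert "other" ((PySem.Dict.mk [("kernel", a), ("driver", b), ("sandbox", c), ("library", d), ("other", e)]).getD "other" 0 + 1) = PySem.Dict.mk [("kernel", a), ("driver", b), ("sandbox", c), ("library", d), ("other", e + 1)] from by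
              simp [PySem.Dict.insert, PySem.Dict.getD, PySem.Dict.get?, PySem.Dict.items], ih]
            simp at h1 h2 h3 h4
            simp [List.countP_cons, pvPK, pvPD, pvPS, pvPL, h1, h2, h3, h4]
            omega

-- The five per-path predicates partition every path: the counts sum to the length.
lemma pv_partition (rs : List String) :
    rs.countP pvPK + rs.countP pvPD + rs.countP pvPS + rs.countP pvPL
      + rs.countP (fun p => !pvPK p && !pvPD p && !pvPS p && !pvPL p) = rs.length := by
  induction rs with
  | nil => simp
  | cons h t ih =>
    simp only [List.countP_cons, List.length_cons]
    by_cases h1 : PySem.Str.isIn "kernel" h = true <;>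
      by_cases h2 : PySem.Str.isIn "driver" h = true <;>
        by_cases h3 : PySem.Str.isIn "sandbox" h = true <;>
          by_cases h4 : PySem.Str.isIn "lib" h = true <;>
            simp_all [pvPK, pvPD, pvPS, pvPL] <;> omega

-- ===== VERDICT (by name: the statement is the Claim_ definition above) =====
theorem categorize_usage_spec : Claim_equal_categorize_usage := by
  intro rs _
  unfold Spec_categorize_usage categorize_usage categorize_usage_alt
  rw [show (PySem.Dict.ofList [("kernel", (0:Int)), ("driver", 0), ("sandbox", 0), ("library", 0), ("other", 0)])
      = PySem.Dict.mk [("kernel", 0), ("driver", 0), ("sandbox", 0), ("library", 0), ("other", 0)] from by decide]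
  rw [pv_fold_items]
  have := pv_partition rs
  simp only [List.cons.injEq, Prod.mk.injEq, and_true, true_and]
  refine ⟨by omega, by omega, by omega, by omega, by omega⟩
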